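-- pv_equiv track=rewrite | github.com/zhaohany/rag-chatbot | app/shared/chunking.py | _split_by_h3
-- ===== SOURCE A (Python) =====
-- def _split_by_h3(text: str) -> list[str]:
--     normalized = text.strip()
--     if not normalized:
--         return []
--
--     lines = normalized.splitlines()
--     sections: list[str] = []
--     current: list[str] = []
--
--     for line in lines:
--         stripped = line.lstrip()
--         is_h3 = stripped.startswith("### ")
--         if is_h3 and current:
--             section = "\n".join(current).strip()
--             if section:
--                 sections.append(section)
--             current = [line]
--             continue
--         current.append(line)
--
--     if current:
--         section = "\n".join(current).strip()
--         if section: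
--             sections.append(section)
--
--     return sections if sections else [normalized]
-- ===== SOURCE B (Python) =====
-- def _span_no_h3(lines):
--     """Split lines at the first H3 header: (prefix without H3, suffix from it)."""
--     for i, line in enumerate(lines):
--         if line.lstrip().startswith("### "):
--             return lines[:i], lines[i:]
--     return lines, []
--
--
-- def _groups(lines):
--     """Recursively cut the line list into groups, each new group opened by an H3
--     header (the very first line always opens the first group)."""
--     if not lines:
--         return []
--     pre, post = _span_no_h3(lines[1:])
--     return [[lines[0]] + pre] + _groups(post)
--
--
-- def _split_by_h3(text: str) -> list[str]:
--     normalized = text.strip()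
--     if not normalized:
--         return []
--     sections = [s for g in _groups(normalized.splitlines())
--                 if (s := "\n".join(g).strip())]
--     return sections if sections else [normalized]
-- ===== Notes on version B (the rewrite author's own statement) =====
-- stated objective: alternative
-- what changed: A's single accumulator fold (sections/current state mutated per line) is replaced by recursive group extraction: find the next H3 boundary with a span helper, slice the line list into groups, then join/strip/filter the groups in one comprehension.
import Mathlib
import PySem

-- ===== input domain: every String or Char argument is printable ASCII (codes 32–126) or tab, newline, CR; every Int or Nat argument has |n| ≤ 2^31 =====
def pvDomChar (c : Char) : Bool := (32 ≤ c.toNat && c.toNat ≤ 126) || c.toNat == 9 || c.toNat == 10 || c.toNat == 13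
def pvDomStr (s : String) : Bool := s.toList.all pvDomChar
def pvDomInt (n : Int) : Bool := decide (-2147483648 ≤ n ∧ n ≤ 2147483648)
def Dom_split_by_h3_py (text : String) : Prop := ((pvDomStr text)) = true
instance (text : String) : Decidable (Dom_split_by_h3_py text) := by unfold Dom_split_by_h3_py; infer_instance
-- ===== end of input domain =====

-- B re-decomposes A's single accumulator loop into recursive group extraction
-- (find next H3 boundary, slice, recurse); objective: alternative decomposition, same cost.

-- ===== PORT A =====
-- A's shared tail: "section = '\n'.join(current).strip(); if section: sections.append(section)"
def pvEmitA (sections : List String) (cur : List String) : List String :=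
  let s := PySem.Str.strip (PySem.Str.join "\n" cur)
  if s ≠ "" then sections ++ [s] else sections

-- A's loop body: state = (sections, current)
def pvStepA (st : List String × List String) (line : String) : List String × List String :=
  let stripped := PySem.Str.lstrip line
  let is_h3 := PySem.Str.startswith stripped "### "
  if is_h3 && !st.2.isEmpty then (pvEmitA st.1 st.2, [line])
  else (st.1, st.2 ++ [line])

def split_by_h3_py (text : String) : List String :=
  let normalized := PySem.Str.strip text
  if normalized = "" then []
  else
    let lines := PySem.Str.splitlines normalized
    let st := lines.foldl pvStepA ([], [])
    let sections := if !st.2.isEmpty then pvEmitA st.1 st.2 else st.1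
    if sections = [] then [normalized] else sections

-- ===== PORT B =====
def pvIsH3 (line : String) : Bool :=
  PySem.Str.startswith (PySem.Str.lstrip line) "### "

-- Source B's _span_no_h3: split at the first H3 line (structural recursion over the list)
def pvSpanNoH3 : List String → List String × List String
  | [] => ([], [])
  | l :: rest =>
    if pvIsH3 l then ([], l :: rest)
    else ((l :: (pvSpanNoH3 rest).1), (pvSpanNoH3 rest).2)

theorem pvSpanNoH3_post_le (ls : List String) : (pvSpanNoH3 ls).2.length ≤ ls.length := by
  induction ls with
  | nil => simp [pvSpanNoH3]
  | cons l rest ih =>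
    simp only [pvSpanNoH3]
    split
    · simp
    · simpa using Nat.le_succ_of_le ih

-- Source B's _groups
def pvGroups : List String → List (List String)
  | [] => []
  | l :: rest => (l :: (pvSpanNoH3 rest).1) :: pvGroups (pvSpanNoH3 rest).2
termination_by ls => ls.length
decreasing_by
  have h := pvSpanNoH3_post_le rest
  simp only [List.length_cons]
  omega

def split_by_h3_py_alt (text : String) : List String :=
  let normalized := PySem.Str.strip text
  if normalized = "" then []
  else
    let sections := (pvGroups (PySem.Str.splitlines normalized)).filterMap
      (fun g =>
        let s := PySem.Str.strip (PySem.Str.join "\n" g)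
        if s = "" then none else some s)
    if sections = [] then [normalized] else sections

-- ===== PRECONDITION & SPEC =====
def Spec_split_by_h3_py (text : String) (out : List String) : Prop := out = split_by_h3_py_alt text
instance (text : String) (out : List String) : Decidable (Spec_split_by_h3_py text out) := by unfold Spec_split_by_h3_py; infer_instance

-- ===== CLAIM (what is proved, stated in full; the proofs are below) =====
def Claim_equal_split_by_h3_py : Prop := ∀ (text : String), Dom_split_by_h3_py text → Spec_split_by_h3_py text (split_by_h3_py text)

-- ===== LEMMAS AND PROOFS =====

def pvEmitB (g : List String) : Option String :=
  let s := PySem.Str.strip (PySem.Str.join "\n" g)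
  if s = "" then none else some s

theorem pvEmitA_eq (sections cur : List String) :
    pvEmitA sections cur = sections ++ (pvEmitB cur).toList := by
  simp only [pvEmitA, pvEmitB]
  split_ifs with h <;> simp_all

theorem pvFilterMap_cons_toList {α β : Type} (f : α → Option β) (a : α) (L : List α) :
    List.filterMap f (a :: L) = (f a).toList ++ List.filterMap f L := by
  cases h : f a <;> simp [h]

theorem pvGroups_nil : pvGroups [] = [] := by simp [pvGroups]

-- the groups still to be produced when the loop state holds `cur` and `ls` lines remain
def pvGroupsFrom (cur : List String) (ls : List String) : List (List String) :=
  (cur ++ (pvSpanNoH3 ls).1) :: pvGroups (pvSpanNoH3 ls).2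

theorem pvGroups_cons (l : String) (rest : List String) :
    pvGroups (l :: rest) = pvGroupsFrom [l] rest := by
  simp [pvGroups, pvGroupsFrom]

-- loop invariant: finishing A's fold from state (sections, cur) with cur ≠ []
theorem pvLoop_eq (ls : List String) : ∀ (sections cur : List String), cur ≠ [] →
    (if !(ls.foldl pvStepA (sections, cur)).2.isEmpty then
       pvEmitA (ls.foldl pvStepA (sections, cur)).1 (ls.foldl pvStepA (sections, cur)).2
     else (ls.foldl pvStepA (sections, cur)).1)
      = sections ++ (pvGroupsFrom cur ls).filterMap pvEmitB := by
  induction ls with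
  | nil =>
    intro sections cur hcur
    simp [pvGroupsFrom, pvSpanNoH3, pvGroups_nil, hcur, pvEmitA_eq,
      pvFilterMap_cons_toList]
  | cons l rest ih =>
    intro sections cur hcur
    by_cases h3 : pvIsH3 l
    · have hstep : pvStepA (sections, cur) l = (pvEmitA sections cur, [l]) := by
        simp [pvIsH3] at h3
        simp [pvStepA, h3, hcur]
      rw [List.foldl_cons, hstep, ih (pvEmitA sections cur) [l] (by simp)]
      have hgf : pvGroupsFrom cur (l :: rest) = cur :: pvGroupsFrom [l] rest := by
        simp [pvGroupsFrom, pvSpanNoH3, h3, pvGroups_cons]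
      rw [hgf, pvFilterMap_cons_toList, pvEmitA_eq, List.append_assoc]
    · have hstep : pvStepA (sections, cur) l = (sections, cur ++ [l]) := by
        simp [pvIsH3] at h3
        simp [pvStepA, h3]
      rw [List.foldl_cons, hstep, ih sections (cur ++ [l]) (by simp)]
      have hgf : pvGroupsFrom cur (l :: rest) = pvGroupsFrom (cur ++ [l]) rest := by
        simp [pvGroupsFrom, pvSpanNoH3, h3]
      rw [hgf]

-- ===== VERDICT (by name: the statement is the Claim_ definition above) =====
theorem split_by_h3_py_spec : Claim_equal_split_by_h3_py := by
  intro text _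
  unfold Spec_split_by_h3_py split_by_h3_py split_by_h3_py_alt
  by_cases hn : PySem.Str.strip text = ""
  · simp [hn]
  · simp only [hn, if_false]
    cases hls : PySem.Str.splitlines (PySem.Str.strip text) with
    | nil => rw [pvGroups_nil]; rfl
    | cons l rest =>
      have hfirst : pvStepA ([], []) l = ([], [l]) := by
        simp [pvStepA]
      have hloop := pvLoop_eq rest [] [l] (by simp)
      rw [List.foldl_cons, hfirst, hloop, pvGroups_cons, List.nil_append,
        show (fun g => if PySem.Str.strip (PySem.Str.join "\n" g) = "" then none
              else some (PySem.Str.strip (PySem.Str.join "\n" g))) = pvEmitB from rfl]
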